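-- pv_equiv track=rewrite | github.com/levelheads/linear-a-decipherer | analysis/scripts/kh_ht_accounting_test.py | is_commodity_logogram
-- ===== SOURCE A (Python) =====
-- COMMODITY_LOGOGRAMS = {
--     "GRA",
--     "VIN",
--     "OLE",
--     "OLIV",
--     "FIC",
--     "FAR",
--     "CYP",
--     "OVI",
--     "CAP",
--     "SUS",
--     "BOS",
--     "VIR",
--     "MUL",
--     "TELA",
--     "NI",
--     "RU",  # potential commodities
-- }
--
-- COMMODITY_PREFIXES = [
--     "GRA",
--     "VIN",
--     "OLE",
--     "OLIV",
--     "FIC",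
--     "FAR",
--     "CYP",
--     "OVI",
--     "CAP",
--     "SUS",
--     "BOS",
--     "VIR",
--     "MUL",
--     "TELA",
-- ]
--
-- def is_commodity_logogram(token):
--     """Check if token is a commodity logogram (including compounds like OLE+U)."""
--     if not token:
--         return False
--     # Exact match
--     if token in COMMODITY_LOGOGRAMS:
--         return True
--     # Check for compound logograms (e.g., OLE+U, GRA+PA)
--     for prefix in COMMODITY_PREFIXES:
--         if token.startswith(prefix + "+") or token.startswith(prefix + "+"):
--             return True
--         if token == prefix:
--             return True
--     return False
-- ===== SOURCE B (Python) =====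
-- COMMODITY_LOGOGRAMS = {
--     "GRA", "VIN", "OLE", "OLIV", "FIC", "FAR", "CYP", "OVI",
--     "CAP", "SUS", "BOS", "VIR", "MUL", "TELA", "NI", "RU",
-- }
--
-- COMMODITY_PREFIX_SET = frozenset({
--     "GRA", "VIN", "OLE", "OLIV", "FIC", "FAR", "CYP",
--     "OVI", "CAP", "SUS", "BOS", "VIR", "MUL", "TELA",
-- })
--
--
-- def is_commodity_logogram(token):
--     """Check if token is a commodity logogram (including compounds like OLE+U)."""
--     if not token:
--         return False
--     if token in COMMODITY_LOGOGRAMS: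
--         return True
--     i = token.find("+")
--     return i >= 0 and token[:i] in COMMODITY_PREFIX_SET
-- ===== Notes on version B (the rewrite author's own statement) =====
-- stated objective: simpler
-- what changed: A's loop over COMMODITY_PREFIXES testing startswith(prefix + '+') for each is replaced by a single find('+') plus one membership test of the part before the first '+' in the prefix set; no per-prefix scan remains.
import Mathlib
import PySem

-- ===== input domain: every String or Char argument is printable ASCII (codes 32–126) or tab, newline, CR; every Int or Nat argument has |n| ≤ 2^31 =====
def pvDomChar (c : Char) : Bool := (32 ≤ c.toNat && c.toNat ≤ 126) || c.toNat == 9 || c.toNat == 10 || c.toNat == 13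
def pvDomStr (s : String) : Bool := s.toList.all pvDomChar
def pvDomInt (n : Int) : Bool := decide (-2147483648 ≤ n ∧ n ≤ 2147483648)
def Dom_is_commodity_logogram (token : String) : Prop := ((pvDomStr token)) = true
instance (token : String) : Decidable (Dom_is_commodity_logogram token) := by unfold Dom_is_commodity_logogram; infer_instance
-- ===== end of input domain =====

-- B replaces A's scan over COMMODITY_PREFIXES (one startswith per prefix) by a single
-- find('+') plus one membership test of the part before the first '+'; objective: simpler.

-- ===== PORT A =====
def commodityLogograms : List String :=
  ["GRA", "VIN", "OLE", "OLIV", "FIC", "FAR", "CYP", "OVI",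
   "CAP", "SUS", "BOS", "VIR", "MUL", "TELA", "NI", "RU"]

def commodityPrefixes : List String :=
  ["GRA", "VIN", "OLE", "OLIV", "FIC", "FAR", "CYP",
   "OVI", "CAP", "SUS", "BOS", "VIR", "MUL", "TELA"]

-- the 'for prefix in COMMODITY_PREFIXES' loop with its early returns
def checkPrefixes (token : String) : List String → Bool
  | [] => false
  | p :: ps =>
    if PySem.Str.startswith token (p ++ "+") || PySem.Str.startswith token (p ++ "+") then true
    else if token == p then true
    else checkPrefixes token ps

def is_commodity_logogram (token : String) : Bool :=
  if token == "" then false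
  else if commodityLogograms.contains token then true
  else checkPrefixes token commodityPrefixes

-- ===== PORT B =====
def commodityPrefixSet : List String :=
  ["GRA", "VIN", "OLE", "OLIV", "FIC", "FAR", "CYP",
   "OVI", "CAP", "SUS", "BOS", "VIR", "MUL", "TELA"]

def is_commodity_logogram_alt (token : String) : Bool :=
  if token == "" then false
  else if commodityLogograms.contains token then true
  else
    let i := PySem.Str.find token "+"
    decide (0 ≤ i) && commodityPrefixSet.contains (PySem.Str.slice token none (some i))

-- ===== PRECONDITION & SPEC =====
def Spec_is_commodity_logogram (token : String) (out : Bool) : Prop := out = is_commodity_logogram_alt token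
instance (token : String) (out : Bool) : Decidable (Spec_is_commodity_logogram token out) := by unfold Spec_is_commodity_logogram; infer_instance

-- ===== CLAIM (what is proved, stated in full; the proofs are below) =====
def Claim_equal_is_commodity_logogram : Prop := ∀ (token : String), Dom_is_commodity_logogram token → Spec_is_commodity_logogram token (is_commodity_logogram token)

-- ===== LEMMAS AND PROOFS =====

-- A's loop returns true iff some prefix matches (compound form, or exact equality)
theorem checkPrefixes_eq_true_iff (token : String) (ps : List String) :
    checkPrefixes token ps = true ↔
      ∃ p ∈ ps, PySem.Chars.startswith token.toList (p.toList ++ ['+']) = true ∨ token = p := by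
  induction ps with
  | nil => simp [checkPrefixes]
  | cons p ps ih =>
    by_cases h1 : PySem.Chars.startswith token.toList (p.toList ++ ['+']) = true
    · simp [checkPrefixes, h1]
    · by_cases h2 : token = p
      · simp [checkPrefixes, h2]
      · simp [checkPrefixes, h1, h2, ih]

-- if token starts with p ++ "+" and p is '+'-free, then the first '+' is at |p| and take gives back p
theorem take_find_of_prefix (ts p : List Char) (hp : '+' ∉ p)
    (h : (p ++ ['+']) <+: ts) :
    0 ≤ PySem.Chars.find ts ['+'] ∧
      ts.take (PySem.Chars.find ts ['+']).toNat = p := by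
  obtain ⟨rest, hrest⟩ := h
  have hts : ts = p ++ '+' :: rest := by simpa using hrest.symm
  have hdropP : ['+'] <+: ts.drop p.length := by
    rw [hts, List.drop_append_of_le_length le_rfl]
    simp
  have h0 : 0 ≤ PySem.Chars.find ts ['+'] := by
    rw [PySem.Chars.find_nonneg_iff, ← PySem.Chars.isIn_iff_infix,
      ← PySem.Chars.exists_prefix_drop_iff_isIn]
    exact ⟨p.length, hdropP⟩
  obtain ⟨hocc, hmin⟩ := PySem.Chars.find_spec h0
  set k := (PySem.Chars.find ts ['+']).toNat with hk
  have hkle : k ≤ p.length := by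
    by_contra hlt
    exact hmin p.length (by omega) hdropP
  have hkeq : k = p.length := by
    rcases Nat.lt_or_ge k p.length with hlt | hge
    · exfalso
      obtain ⟨t, ht⟩ := hocc
      rw [hts, List.drop_append_of_le_length (by omega),
        List.drop_eq_getElem_cons hlt] at ht
      simp only [List.cons_append, List.cons.injEq] at ht
      exact hp (ht.1 ▸ List.getElem_mem hlt)
    · omega
  refine ⟨h0, ?_⟩
  rw [hts, hkeq]
  exact List.take_left

-- conversely the text before the first '+' followed by '+' is a prefix of ts
theorem prefix_of_find_nonneg (ts : List Char) (h0 : 0 ≤ PySem.Chars.find ts ['+']) :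
    ts.take (PySem.Chars.find ts ['+']).toNat ++ ['+'] <+: ts := by
  obtain ⟨hocc, -⟩ := PySem.Chars.find_spec h0
  set k := (PySem.Chars.find ts ['+']).toNat
  obtain ⟨rest, hrest⟩ := hocc
  refine ⟨rest, ?_⟩
  rw [List.append_assoc, hrest]
  exact List.take_append_drop k ts

-- the per-prefix bridge between A's startswith test and B's find/slice test
theorem startswith_iff_find_slice (token p : String) (hp : '+' ∉ p.toList) :
    PySem.Chars.startswith token.toList (p.toList ++ ['+']) = true ↔
      0 ≤ PySem.Str.find token "+" ∧
        PySem.Str.slice token none (some (PySem.Str.find token "+")) = p := by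
  rw [PySem.Chars.startswith_iff, PySem.Str.find_eq,
    ← String.toList_inj, PySem.Str.toList_slice]
  have hplus : ("+" : String).toList = ['+'] := rfl
  rw [hplus]
  constructor
  · intro h
    obtain ⟨h0, hTake⟩ := take_find_of_prefix token.toList p.toList hp h
    exact ⟨h0, (PySem.List.slice_to _ h0).trans hTake⟩
  · rintro ⟨h0, hsl⟩
    have hsl' : List.take (PySem.Chars.find token.toList ['+']).toNat token.toList = p.toList :=
      (PySem.List.slice_to _ h0).symm.trans hsl
    rw [← hsl']
    exact prefix_of_find_nonneg token.toList h0

theorem prefixes_plus_free : ∀ p ∈ commodityPrefixes, '+' ∉ p.toList := by decide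

theorem prefixes_sub_logograms : ∀ p ∈ commodityPrefixes, p ∈ commodityLogograms := by decide

theorem prefixSet_eq : commodityPrefixSet = commodityPrefixes := rfl

-- ===== VERDICT (by name: the statement is the Claim_ definition above) =====
theorem is_commodity_logogram_spec : Claim_equal_is_commodity_logogram := by
  intro token _
  unfold Spec_is_commodity_logogram is_commodity_logogram is_commodity_logogram_alt
  by_cases he : token = ""
  · simp [he]
  · by_cases hm : token ∈ commodityLogograms
    · simp [he, hm]
    · simp only [he, hm, beq_iff_eq, if_false, List.contains_iff_mem]
      rw [Bool.eq_iff_iff, checkPrefixes_eq_true_iff]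
      simp only [Bool.and_eq_true, decide_eq_true_eq, List.contains_iff_mem, prefixSet_eq]
      constructor
      · rintro ⟨p, hpmem, hsw | rfl⟩
        · obtain ⟨h0, hsl⟩ :=
            (startswith_iff_find_slice token p (prefixes_plus_free p hpmem)).mp hsw
          exact ⟨h0, hsl ▸ hpmem⟩
        · exact absurd (prefixes_sub_logograms _ hpmem) hm
      · rintro ⟨h0, hmem⟩
        refine ⟨_, hmem, Or.inl ?_⟩
        exact (startswith_iff_find_slice token _ (prefixes_plus_free _ hmem)).mpr ⟨h0, rfl⟩
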